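-- pv_equiv track=rewrite | github.com/idohasson/SwifTCR | check/memoized_distance.py | memoized_distance
-- ===== SOURCE A (Python) =====
-- from typing import Dict, Tuple
--
-- def memoized_distance(v: str, w: str, memo: Dict[Tuple[str, str], int]) -> int:
--     '''
--     This Python function takes two strings v and w and a memoization dictionary memo, which maps pairs of strings to distances. The function returns the Levenshtein distance with transposition between the two strings, calculated recursively and memoized.
--
--     The implementation is similar to the Java implementation. The function checks if the distance has already been memoized, and returns it if it has. If not, it calculates the distance using a recursive algorithm.
--
--     The algorithm works as follows:
--
--     If one of the strings is empty, the distance is the length of the other string.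
--     If the first characters of the strings are the same, the distance is the distance between the rest of the strings.
--     Otherwise, the distance is the minimum of the distances of three subproblems: deleting the first character of the first string, deleting the first character of the second string, and swapping the first two characters of both strings (if they are different and the second characters match).
--     The distance with transposition is the minimum of these three distances, plus 1.
--     The algorithm memoizes the distances of subproblems using the memo dictionary to avoid redundant calculations.
--
--     :param v:
--     :param w:
--     :param memo:
--     :return:
--     '''
--     if (v, w) in memo:
--         return memo[(v, w)]
--
--     if not v:
--         return len(w)
--
--     if not w:
--         return len(v)
--
--     if v[0] == w[0]:
--         return memoized_distance(v[1:], w[1:], memo)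
--
--     # Calculate distances of subproblems
--     distance_delete_v = memoized_distance(v[1:], w, memo)
--     distance_delete_w = memoized_distance(v, w[1:], memo)
--     distance_swap = memoized_distance(v[2:], w[2:], memo) if len(v) > 1 and len(w) > 1 and v[0] == w[1] and v[1] == w[0] else float('inf')
--
--     # Memoize the minimum distance
--     distance = 1 + min(distance_delete_v, distance_delete_w, distance_swap)
--     memo[(v, w)] = distance
--     return distance
-- ===== SOURCE B (Python) =====
-- def memoized_distance(v, w, memo):
--     # Bottom-up DP over suffix start indices (i, j): no string slicing or
--     # tuple-of-strings hashing in the DP itself. Pre-seeded memo entries are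
--     # translated once into index space (a key (a, b) is relevant iff a is a
--     # suffix of v and b a suffix of w). Unlike A, memo is not written to;
--     # only the return value is reproduced.
--     n, m = len(v), len(w)
--     seed = {}
--     for key, val in memo.items():
--         if len(key) == 2:
--             a, b = key
--             if v.endswith(a) and w.endswith(b):
--                 seed.setdefault((n - len(a), m - len(b)), val)
--     below2 = []   # row i+2 of the DP table (ascending j), dummy until set
--     below = []    # row i+1, dummy until the first row is produced
--     for i in range(n, -1, -1):
--         rrow = []     # row i, collected for j = m down to 0; reversed at the end
--         right = 0     # d[i][j+1] (the previously computed cell); dummy at j = m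
--         for j in range(m, -1, -1):
--             got = seed.get((i, j))
--             if got is not None:
--                 cur = got
--             elif i == n:
--                 cur = m - j
--             elif j == m:
--                 cur = n - i
--             elif v[i] == w[j]:
--                 cur = below[j + 1]
--             else:
--                 best = below[j] if below[j] < right else right
--                 if i + 1 < n and j + 1 < m and v[i] == w[j + 1] and v[i + 1] == w[j]:
--                     if below2[j + 2] < best:
--                         best = below2[j + 2]
--                 cur = 1 + best
--             rrow.append(cur)
--             right = cur
--         rrow.reverse()
--         below2 = below
--         below = rrow
--     return below[0]
-- ===== Notes on version B (the rewrite author's own statement) =====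
-- stated objective: faster
-- what changed: Replaces A's top-down recursion over string suffixes (memo keyed by string pairs, with O(n+m) slicing/hashing per subproblem) by a bottom-up two-row DP over suffix start indices; pre-seeded memo entries are translated once into index space, so the DP does no string slicing or string hashing.
import Mathlib
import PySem

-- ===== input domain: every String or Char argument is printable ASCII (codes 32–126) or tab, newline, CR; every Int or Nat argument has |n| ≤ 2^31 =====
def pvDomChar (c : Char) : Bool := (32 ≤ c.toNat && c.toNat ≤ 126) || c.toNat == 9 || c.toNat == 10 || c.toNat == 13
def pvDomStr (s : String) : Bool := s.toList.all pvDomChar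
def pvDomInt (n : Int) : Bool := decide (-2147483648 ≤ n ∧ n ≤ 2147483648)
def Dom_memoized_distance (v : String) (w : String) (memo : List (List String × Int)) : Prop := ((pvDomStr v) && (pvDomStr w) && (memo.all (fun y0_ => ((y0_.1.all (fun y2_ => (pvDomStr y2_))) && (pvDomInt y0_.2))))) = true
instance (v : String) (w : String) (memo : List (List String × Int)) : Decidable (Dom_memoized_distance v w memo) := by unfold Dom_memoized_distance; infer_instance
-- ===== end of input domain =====

-- B replaces A's top-down recursion over string suffixes by a bottom-up index DP
-- (objective: faster — no string slicing/hashing per subproblem).  A also writes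
-- computed distances into the caller's memo dict; B does not: the equivalence
-- proved here is about the RETURN value only.

-- ===== PORT A =====
-- Literal transliteration of A: top-down recursion on the two strings, threading
-- the memo dict (v[1:], v[2:] on a list are drop 1 / drop 2; the 'in'/'[]' pair
-- is the single get? match; 'min(a, b, inf)' has the value 'min a b').
def goA (x : List Char) (y : List Char) (st : PySem.Dict (List String) Int) :
    Int × PySem.Dict (List String) Int :=
  match st.get? [String.ofList x, String.ofList y] with
  | some d => (d, st)
  | none =>
    match x, y with
    | [], _ => ((y.length : Int), st)
    | _, [] => ((x.length : Int), st)
    | a :: xs, b :: ys =>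
      if a = b then goA xs ys st
      else
        let r1 := goA xs (b :: ys) st
        let r2 := goA (a :: xs) ys r1.2
        if 1 < (a :: xs).length ∧ 1 < (b :: ys).length ∧
            (a :: xs).getD 0 'x' = (b :: ys).getD 1 'x' ∧
            (a :: xs).getD 1 'x' = (b :: ys).getD 0 'x' then
          let r3 := goA ((a :: xs).drop 2) ((b :: ys).drop 2) r2.2
          let dist := 1 + min (min r1.1 r2.1) r3.1
          (dist, r3.2.insert [String.ofList (a :: xs), String.ofList (b :: ys)] dist)
        else
          let dist := 1 + min r1.1 r2.1
          (dist, r2.2.insert [String.ofList (a :: xs), String.ofList (b :: ys)] dist)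
termination_by x.length + y.length
decreasing_by all_goals (simp_all; try omega)

def memoized_distance (v : String) (w : String) (memo : List (List String × Int)) : Int :=
  (goA v.toList w.toList (PySem.Dict.mk memo)).1

-- ===== PORT B =====
-- Transliteration of Source B.  seedStep/seedOf is Source B's first loop (dict.setdefault
-- keeps the first binding, matching the association-list convention).  bCur is the
-- body computing 'cur' in the inner 'for j in range(m, -1, -1)' loop; Source B appends
-- cur and reverses the row at the end, which builds exactly the ascending list
-- 'cur :: rs.1' kept here; 'rs.2' is Source B's 'right' (the previous cur).  All list
-- indexing below[j], below[j+1], below2[j+2], v[i], w[j] is evaluated only in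
-- range, so the total pyGetD form is exact there.
def seedStep (v : String) (w : String) (s : PySem.Dict (Int × Int) Int)
    (kv : List String × Int) : PySem.Dict (Int × Int) Int :=
  match kv.1 with
  | [a, b] =>
    if PySem.Str.endswith v a ∧ PySem.Str.endswith w b then
      s.setdefault (PySem.Str.len v - PySem.Str.len a, PySem.Str.len w - PySem.Str.len b) kv.2
    else s
  | _ => s

def seedOf (v : String) (w : String) (memo : List (List String × Int)) :
    PySem.Dict (Int × Int) Int :=
  memo.foldl (seedStep v w) PySem.Dict.empty

def bCur (vl wl : List Char) (n m : Int) (seed : PySem.Dict (Int × Int) Int)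
    (below2 below : List Int) (i : Int) (right : Int) (j : Int) : Int :=
  match seed.get? (i, j) with
  | some g => g
  | none =>
    if i = n then m - j
    else if j = m then n - i
    else if PySem.List.pyGetD vl i 'x' = PySem.List.pyGetD wl j 'x' then
      PySem.List.pyGetD below (j + 1) 0
    else
      let bj := PySem.List.pyGetD below j 0
      let best := if bj < right then bj else right
      let best :=
        if i + 1 < n ∧ j + 1 < m ∧
            PySem.List.pyGetD vl i 'x' = PySem.List.pyGetD wl (j + 1) 'x' ∧
            PySem.List.pyGetD vl (i + 1) 'x' = PySem.List.pyGetD wl j 'x' then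
          (if PySem.List.pyGetD below2 (j + 2) 0 < best then PySem.List.pyGetD below2 (j + 2) 0 else best)
        else best
      1 + best

def bInner (vl wl : List Char) (n m : Int) (seed : PySem.Dict (Int × Int) Int)
    (below2 below : List Int) (i : Int) (rs : List Int × Int) (j : Int) : List Int × Int :=
  let cur := bCur vl wl n m seed below2 below i rs.2 j
  (cur :: rs.1, cur)

def bOuter (vl wl : List Char) (n m : Int) (seed : PySem.Dict (Int × Int) Int)
    (st : List Int × List Int) (i : Int) : List Int × List Int :=
  let inner := (PySem.List.pyRange m (-1) (-1)).foldl (bInner vl wl n m seed st.1 st.2 i) ([], 0)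
  (st.2, inner.1)

def memoized_distance_alt (v : String) (w : String) (memo : List (List String × Int)) : Int :=
  let vl := v.toList
  let wl := w.toList
  let n : Int := vl.length
  let m : Int := wl.length
  let seed := seedOf v w memo
  let final := (PySem.List.pyRange n (-1) (-1)).foldl (bOuter vl wl n m seed) ([], [])
  PySem.List.pyGetD final.2 0 0

-- ===== PRECONDITION & SPEC =====
def Spec_memoized_distance (v : String) (w : String) (memo : List (List String × Int)) (out : Int) : Prop := out = memoized_distance_alt v w memo
instance (v : String) (w : String) (memo : List (List String × Int)) (out : Int) : Decidable (Spec_memoized_distance v w memo out) := by unfold Spec_memoized_distance; infer_instance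

-- ===== CLAIM (what is proved, stated in full; the proofs are below) =====
def Claim_equal_memoized_distance : Prop := ∀ (v : String) (w : String) (memo : List (List String × Int)), Dom_memoized_distance v w memo → Spec_memoized_distance v w memo (memoized_distance v w memo)

-- ===== LEMMAS AND PROOFS =====

-- Pure specification of A's recursion: the value A computes, as a function of the
-- ORIGINAL memo only (entries A writes during the run carry exactly these values).
def Fspec (d0 : PySem.Dict (List String) Int) (x : List Char) (y : List Char) : Int :=
  match d0.get? [String.ofList x, String.ofList y] with
  | some r => r
  | none =>
    match x, y with
    | [], _ => (y.length : Int)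
    | _, [] => (x.length : Int)
    | a :: xs, b :: ys =>
      if a = b then Fspec d0 xs ys
      else
        let dv := Fspec d0 xs (b :: ys)
        let dw := Fspec d0 (a :: xs) ys
        if 1 < (a :: xs).length ∧ 1 < (b :: ys).length ∧
            (a :: xs).getD 0 'x' = (b :: ys).getD 1 'x' ∧
            (a :: xs).getD 1 'x' = (b :: ys).getD 0 'x' then
          1 + min (min dv dw) (Fspec d0 ((a :: xs).drop 2) ((b :: ys).drop 2))
        else 1 + min dv dw
termination_by x.length + y.length
decreasing_by all_goals (simp_all; try omega)

lemma Fspec_memo (d0 : PySem.Dict (List String) Int) (x y : List Char) (r : Int)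
    (hd : d0.get? [String.ofList x, String.ofList y] = some r) : Fspec d0 x y = r := by
  rw [Fspec.eq_def, hd]

lemma Fspec_nil (d0 : PySem.Dict (List String) Int) (y : List Char)
    (hd : d0.get? [String.ofList [], String.ofList y] = none) :
    Fspec d0 [] y = (y.length : Int) := by
  rw [Fspec.eq_def, hd]

lemma Fspec_cons_nil (d0 : PySem.Dict (List String) Int) (a : Char) (xs : List Char)
    (hd : d0.get? [String.ofList (a :: xs), String.ofList []] = none) :
    Fspec d0 (a :: xs) [] = ((a :: xs).length : Int) := by
  rw [Fspec.eq_def, hd]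

lemma Fspec_cons (d0 : PySem.Dict (List String) Int) (a b : Char) (xs ys : List Char)
    (hd : d0.get? [String.ofList (a :: xs), String.ofList (b :: ys)] = none) :
    Fspec d0 (a :: xs) (b :: ys) =
      if a = b then Fspec d0 xs ys
      else
        if 1 < (a :: xs).length ∧ 1 < (b :: ys).length ∧
            (a :: xs).getD 0 'x' = (b :: ys).getD 1 'x' ∧
            (a :: xs).getD 1 'x' = (b :: ys).getD 0 'x' then
          1 + min (min (Fspec d0 xs (b :: ys)) (Fspec d0 (a :: xs) ys))
            (Fspec d0 ((a :: xs).drop 2) ((b :: ys).drop 2))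
        else 1 + min (Fspec d0 xs (b :: ys)) (Fspec d0 (a :: xs) ys) := by
  rw [Fspec.eq_def, hd]

lemma ofList_inj {a b : List Char} (h : String.ofList a = String.ofList b) : a = b := by
  have := congrArg String.toList h; simpa using this

-- invariant on A's threaded memo state
def GoodSt (d0 st : PySem.Dict (List String) Int) : Prop :=
  (∀ (x y : List Char) (r : Int), st.get? [String.ofList x, String.ofList y] = some r → r = Fspec d0 x y)
  ∧ (∀ (k : List String) (r : Int), d0.get? k = some r → (st.get? k).isSome = true)

lemma good_insert (d0 st : PySem.Dict (List String) Int) (x y : List Char)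
    (hG : GoodSt d0 st) :
    GoodSt d0 (st.insert [String.ofList x, String.ofList y] (Fspec d0 x y)) := by
  constructor
  · intro x' y' r h
    rw [PySem.Dict.get?_insert] at h
    split_ifs at h with h'
    · have h1 : String.ofList x' = String.ofList x ∧ String.ofList y' = String.ofList y := by
        simpa using h'
      rw [ofList_inj h1.1, ofList_inj h1.2]
      exact (Option.some.inj h).symm
    · exact hG.1 x' y' r h
  · intro k r h
    rw [PySem.Dict.get?_insert]
    split_ifs with h'
    · rfl
    · exact hG.2 k r h

lemma goA_main (d0 : PySem.Dict (List String) Int) :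
    ∀ (N : Nat) (x y : List Char) (st : PySem.Dict (List String) Int),
      x.length + y.length ≤ N → GoodSt d0 st →
      (goA x y st).1 = Fspec d0 x y ∧ GoodSt d0 (goA x y st).2 := by
  intro N
  induction N using Nat.strong_induction_on with
  | _ N ih =>
  intro x y st hN hG
  cases hst : st.get? [String.ofList x, String.ofList y] with
  | some r =>
    rw [goA.eq_def, hst]
    exact ⟨hG.1 x y r hst, hG⟩
  | none =>
    have hd0 : d0.get? [String.ofList x, String.ofList y] = none := by
      cases hd : d0.get? [String.ofList x, String.ofList y] with
      | none => rfl
      | some r =>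
        have h2 := hG.2 _ r hd
        rw [hst] at h2; simp at h2
    rw [goA.eq_def, hst]
    cases x with
    | nil =>
      refine ⟨?_, hG⟩
      rw [Fspec_nil d0 y hd0]
    | cons a xs =>
      cases y with
      | nil =>
        refine ⟨?_, hG⟩
        rw [Fspec_cons_nil d0 a xs hd0]
      | cons b ys =>
        simp only [List.length_cons] at hN
        by_cases hab : a = b
        · simp only [if_pos hab]
          have hrec := ih (xs.length + ys.length) (by omega) xs ys st le_rfl hG
          refine ⟨?_, hrec.2⟩
          rw [hrec.1, Fspec_cons d0 a b xs ys hd0, if_pos hab]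
        · simp only [if_neg hab]
          have h1 := ih (xs.length + (b :: ys).length) (by simp; omega) xs (b :: ys) st le_rfl hG
          have h2 := ih ((a :: xs).length + ys.length) (by simp; omega) (a :: xs) ys
            (goA xs (b :: ys) st).2 le_rfl h1.2
          by_cases hsw : 1 < (a :: xs).length ∧ 1 < (b :: ys).length ∧
              (a :: xs).getD 0 'x' = (b :: ys).getD 1 'x' ∧
              (a :: xs).getD 1 'x' = (b :: ys).getD 0 'x'
          · simp only [if_pos hsw]
            have h3 := ih (((a :: xs).drop 2).length + ((b :: ys).drop 2).length)
              (by simp; omega) ((a :: xs).drop 2) ((b :: ys).drop 2)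
              (goA (a :: xs) ys (goA xs (b :: ys) st).2).2 le_rfl h2.2
            have hval : 1 + min (min (goA xs (b :: ys) st).1
                  (goA (a :: xs) ys (goA xs (b :: ys) st).2).1)
                  (goA ((a :: xs).drop 2) ((b :: ys).drop 2)
                    (goA (a :: xs) ys (goA xs (b :: ys) st).2).2).1
                = Fspec d0 (a :: xs) (b :: ys) := by
              rw [h1.1, h2.1, h3.1, Fspec_cons d0 a b xs ys hd0, if_neg hab, if_pos hsw]
            refine ⟨hval, ?_⟩
            rw [hval]
            exact good_insert d0 _ (a :: xs) (b :: ys) h3.2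
          · simp only [if_neg hsw]
            have hval : 1 + min (goA xs (b :: ys) st).1
                  (goA (a :: xs) ys (goA xs (b :: ys) st).2).1
                = Fspec d0 (a :: xs) (b :: ys) := by
              rw [h1.1, h2.1, Fspec_cons d0 a b xs ys hd0, if_neg hab, if_neg hsw]
            refine ⟨hval, ?_⟩
            rw [hval]
            exact good_insert d0 _ (a :: xs) (b :: ys) h2.2

lemma A_eq_F (v w : String) (memo : List (List String × Int)) :
    memoized_distance v w memo = Fspec (PySem.Dict.mk memo) v.toList w.toList := by
  have h := goA_main (PySem.Dict.mk memo) (v.toList.length + w.toList.length) v.toList w.toList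
      (PySem.Dict.mk memo) le_rfl ?_
  · exact h.1
  · constructor
    · intro x y r h
      rw [Fspec_memo _ _ _ _ h]
    · intro k r h; simp [h]

-- ---- B side ----

lemma suffix_drop {l xs : List Char} (h : l <:+ xs) : xs.drop (xs.length - l.length) = l := by
  obtain ⟨p, rfl⟩ := h
  have h1 : (p ++ l).length - l.length = p.length := by simp
  rw [h1, List.drop_left]

lemma seed_fold (v w : String) (i j : Nat) (hi : i ≤ v.toList.length) (hj : j ≤ w.toList.length) :
    ∀ (l : List (List String × Int)) (s : PySem.Dict (Int × Int) Int),
      (l.foldl (seedStep v w) s).get? ((i : Int), (j : Int)) =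
        ((s.get? ((i : Int), (j : Int))).or
          ((PySem.Dict.mk l).get? [String.ofList (v.toList.drop i), String.ofList (w.toList.drop j)])) := by
  intro l
  induction l with
  | nil =>
    intro s
    have h0 : (PySem.Dict.mk ([] : List (List String × Int))).get?
        [String.ofList (v.toList.drop i), String.ofList (w.toList.drop j)] = none := rfl
    rw [List.foldl_nil, h0, Option.or_none]
  | cons kv t iht =>
    intro s
    obtain ⟨k, val⟩ := kv
    rw [List.foldl_cons, iht, PySem.Dict.get?_mk_cons]
    by_cases hk : k = [String.ofList (v.toList.drop i), String.ofList (w.toList.drop j)]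
    · have hsuffv : PySem.Str.endswith v (String.ofList (v.toList.drop i)) = true := by
        rw [PySem.Str.endswith_eq, PySem.Chars.endswith_iff]
        simp only [String.toList_ofList]
        exact List.drop_suffix i v.toList
      have hsuffw : PySem.Str.endswith w (String.ofList (w.toList.drop j)) = true := by
        rw [PySem.Str.endswith_eq, PySem.Chars.endswith_iff]
        simp only [String.toList_ofList]
        exact List.drop_suffix j w.toList
      have hlv : PySem.Str.len v - PySem.Str.len (String.ofList (v.toList.drop i)) = (i : Int) := by
        simp only [PySem.Str.len_eq, String.toList_ofList, List.length_drop]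
        omega
      have hlw : PySem.Str.len w - PySem.Str.len (String.ofList (w.toList.drop j)) = (j : Int) := by
        simp only [PySem.Str.len_eq, String.toList_ofList, List.length_drop]
        omega
      have hstep : seedStep v w s (k, val) = s.setdefault ((i : Int), (j : Int)) val := by
        subst hk
        show (if PySem.Str.endswith v _ ∧ PySem.Str.endswith w _ then _ else s) = _
        rw [if_pos ⟨hsuffv, hsuffw⟩, hlv, hlw]
      rw [hstep, PySem.Dict.get?_setdefault_self, if_pos (by simp [hk])]
      cases s.get? ((i : Int), (j : Int)) <;> rfl
    · rw [if_neg (by simp [hk])]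
      have hstep : (seedStep v w s (k, val)).get? ((i : Int), (j : Int)) =
          s.get? ((i : Int), (j : Int)) := by
        rcases k with _ | ⟨a, k1⟩
        · rfl
        rcases k1 with _ | ⟨b, k2⟩
        · rfl
        rcases k2 with _ | ⟨c, k3⟩
        · show (if PySem.Str.endswith v a ∧ PySem.Str.endswith w b then _ else s).get? _ = _
          split_ifs with hcond
          · refine PySem.Dict.get?_setdefault_of_ne s val ?_
            intro heq
            apply hk
            obtain ⟨hsa, hsb⟩ := hcond
            rw [PySem.Str.endswith_eq, PySem.Chars.endswith_iff] at hsa hsb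
            have hla : a.toList.length ≤ v.toList.length := hsa.length_le
            have hlb : b.toList.length ≤ w.toList.length := hsb.length_le
            have heq1 := congrArg Prod.fst heq
            have heq2 := congrArg Prod.snd heq
            simp only [PySem.Str.len_eq] at heq1 heq2
            have hia : a.toList.length = v.toList.length - i := by omega
            have hjb : b.toList.length = w.toList.length - j := by omega
            have hda : v.toList.drop i = a.toList := by
              have h5 := suffix_drop hsa
              rw [hia] at h5
              rwa [show v.toList.length - (v.toList.length - i) = i by omega] at h5
            have hdb : w.toList.drop j = b.toList := by
              have h5 := suffix_drop hsb
              rw [hjb] at h5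
              rwa [show w.toList.length - (w.toList.length - j) = j by omega] at h5
            rw [hda, hdb, String.ofList_toList, String.ofList_toList]
          · rfl
        · rfl
      rw [hstep]

lemma seed_get (v w : String) (memo : List (List String × Int)) (i j : Nat)
    (hi : i ≤ v.toList.length) (hj : j ≤ w.toList.length) :
    (seedOf v w memo).get? ((i : Int), (j : Int)) =
      (PySem.Dict.mk memo).get? [String.ofList (v.toList.drop i), String.ofList (w.toList.drop j)] := by
  unfold seedOf
  rw [seed_fold v w i j hi hj memo PySem.Dict.empty, PySem.Dict.get?_empty, Option.none_or]

def pvCell (memo : List (List String × Int)) (vl wl : List Char) (i j : Nat) : Int :=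
  Fspec (PySem.Dict.mk memo) (vl.drop i) (wl.drop j)

def pvRow (memo : List (List String × Int)) (vl wl : List Char) (i j : Nat) : List Int :=
  (List.range' j (wl.length + 1 - j)).map (pvCell memo vl wl i)

def pvR (memo : List (List String × Int)) (vl wl : List Char) (i j : Nat) : Int :=
  if j ≤ wl.length then pvCell memo vl wl i j else 0

lemma pvRow_cons (memo : List (List String × Int)) (vl wl : List Char) (i j : Nat)
    (hj : j ≤ wl.length) :
    pvRow memo vl wl i j = pvCell memo vl wl i j :: pvRow memo vl wl i (j + 1) := by
  unfold pvRow
  rw [show wl.length + 1 - (j + 1) = wl.length - j by omega,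
    show wl.length + 1 - j = (wl.length - j) + 1 by omega, List.range'_succ, List.map_cons]

lemma pvRow_getD (memo : List (List String × Int)) (vl wl : List Char) (i : Nat)
    (k : Nat) (hk : k ≤ wl.length) :
    (pvRow memo vl wl i 0).getD k 0 = pvCell memo vl wl i k := by
  unfold pvRow
  rw [List.getD_eq_getElem _ _ (by simp; omega)]
  simp [List.getElem_range']

lemma getD_drop (l : List Char) (a b : Nat) (d : Char) :
    (l.drop a).getD b d = l.getD (a + b) d := by
  by_cases h : a + b < l.length
  · rw [List.getD_eq_getElem _ _ (by simp; omega), List.getD_eq_getElem _ _ h]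
    simp [List.getElem_drop]
  · rw [List.getD_eq_default _ _ (by simp; omega), List.getD_eq_default _ _ (by omega)]

lemma bCur_eq (v w : String) (memo : List (List String × Int)) (below2 below : List Int)
    (i j : Nat) (hi : i ≤ v.toList.length) (hj : j ≤ w.toList.length)
    (hb : i < v.toList.length → below = pvRow memo v.toList w.toList (i + 1) 0)
    (hb2 : i + 1 < v.toList.length → below2 = pvRow memo v.toList w.toList (i + 2) 0) :
    bCur v.toList w.toList (v.toList.length : Int) (w.toList.length : Int)
      (seedOf v w memo) below2 below (i : Int) (pvR memo v.toList w.toList i (j + 1)) (j : Int)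
    = pvCell memo v.toList w.toList i j := by
  unfold bCur pvCell
  rw [seed_get v w memo i j hi hj]
  cases hd : (PySem.Dict.mk memo).get?
      [String.ofList (v.toList.drop i), String.ofList (w.toList.drop j)] with
  | some g =>
    rw [Fspec_memo _ _ _ _ hd]
  | none =>
    by_cases hin : i = v.toList.length
    · rw [if_pos (by omega : (i : Int) = (v.toList.length : Int))]
      rw [hin, List.drop_length] at hd ⊢
      rw [Fspec_nil _ _ hd, List.length_drop]
      show (w.toList.length : Int) - (j : Int) = ((w.toList.length - j : Nat) : Int)
      omega
    · have hiln : i < v.toList.length := lt_of_le_of_ne hi hin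
      rw [if_neg (by omega : ¬ ((i : Int) = (v.toList.length : Int)))]
      have hvi : v.toList.drop i = v.toList[i] :: v.toList.drop (i + 1) :=
        List.drop_eq_getElem_cons hiln
      by_cases hjm : j = w.toList.length
      · rw [if_pos (by omega : (j : Int) = (w.toList.length : Int))]
        rw [hjm, List.drop_length] at hd ⊢
        rw [hvi] at hd ⊢
        rw [Fspec_cons_nil _ _ _ hd, List.length_cons, List.length_drop]
        show (v.toList.length : Int) - (i : Int) = ((v.toList.length - (i + 1) + 1 : Nat) : Int)
        omega
      · have hjlm : j < w.toList.length := lt_of_le_of_ne hj hjm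
        rw [if_neg (by omega : ¬ ((j : Int) = (w.toList.length : Int)))]
        have hwj : w.toList.drop j = w.toList[j] :: w.toList.drop (j + 1) :=
          List.drop_eq_getElem_cons hjlm
        have hgi : PySem.List.pyGetD v.toList (i : Int) 'x' = v.toList[i] := by
          rw [PySem.List.pyGetD_natCast]; exact List.getD_eq_getElem _ _ hiln
        have hgj : PySem.List.pyGetD w.toList (j : Int) 'x' = w.toList[j] := by
          rw [PySem.List.pyGetD_natCast]; exact List.getD_eq_getElem _ _ hjlm
        rw [hvi, hwj] at hd ⊢
        rw [hgi, hgj, Fspec_cons _ _ _ _ _ hd]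
        by_cases hc : v.toList[i] = w.toList[j]
        · rw [if_pos hc, if_pos hc]
          rw [hb hiln, show ((j : Int) + 1) = ((j + 1 : Nat) : Int) by push_cast; ring,
            PySem.List.pyGetD_natCast,
            pvRow_getD memo v.toList w.toList (i + 1) (j + 1) (by omega)]
          rfl
        · rw [if_neg hc, if_neg hc]
          dsimp only
          rw [hb hiln, PySem.List.pyGetD_natCast,
            pvRow_getD memo v.toList w.toList (i + 1) j (by omega)]
          rw [show pvR memo v.toList w.toList i (j + 1) = pvCell memo v.toList w.toList i (j + 1)
            from by unfold pvR; rw [if_pos (by omega)]]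
          have hlen1 : (1 < (v.toList[i] :: v.toList.drop (i + 1)).length) ↔ i + 1 < v.toList.length := by
            simp only [List.length_cons, List.length_drop]; omega
          have hlen2 : (1 < (w.toList[j] :: w.toList.drop (j + 1)).length) ↔ j + 1 < w.toList.length := by
            simp only [List.length_cons, List.length_drop]; omega
          have hgd1w : (w.toList[j] :: w.toList.drop (j + 1)).getD 1 'x' = w.toList.getD (j + 1) 'x' := by
            show (w.toList.drop (j + 1)).getD 0 'x' = _
            rw [getD_drop]
          have hgd1v : (v.toList[i] :: v.toList.drop (i + 1)).getD 1 'x' = v.toList.getD (i + 1) 'x' := by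
            show (v.toList.drop (i + 1)).getD 0 'x' = _
            rw [getD_drop]
          have hpj1 : PySem.List.pyGetD w.toList ((j : Int) + 1) 'x' = w.toList.getD (j + 1) 'x' := by
            rw [show ((j : Int) + 1) = ((j + 1 : Nat) : Int) by push_cast; ring,
              PySem.List.pyGetD_natCast]
          have hpi1 : PySem.List.pyGetD v.toList ((i : Int) + 1) 'x' = v.toList.getD (i + 1) 'x' := by
            rw [show ((i : Int) + 1) = ((i + 1 : Nat) : Int) by push_cast; ring,
              PySem.List.pyGetD_natCast]
          have hswiff : ((i : Int) + 1 < (v.toList.length : Int) ∧ (j : Int) + 1 < (w.toList.length : Int) ∧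
                v.toList[i] = PySem.List.pyGetD w.toList ((j : Int) + 1) 'x' ∧
                PySem.List.pyGetD v.toList ((i : Int) + 1) 'x' = w.toList[j]) ↔
              (1 < (v.toList[i] :: v.toList.drop (i + 1)).length ∧
                1 < (w.toList[j] :: w.toList.drop (j + 1)).length ∧
                (v.toList[i] :: v.toList.drop (i + 1)).getD 0 'x' =
                  (w.toList[j] :: w.toList.drop (j + 1)).getD 1 'x' ∧
                (v.toList[i] :: v.toList.drop (i + 1)).getD 1 'x' =
                  (w.toList[j] :: w.toList.drop (j + 1)).getD 0 'x') := by
            rw [hlen1, hlen2, hgd1w, hgd1v, hpj1, hpi1, List.getD_cons_zero, List.getD_cons_zero]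
            constructor
            · rintro ⟨c1, c2, c3, c4⟩; exact ⟨by omega, by omega, c3, c4⟩
            · rintro ⟨c1, c2, c3, c4⟩; exact ⟨by omega, by omega, c3, c4⟩
          have hd2v : (v.toList[i] :: v.toList.drop (i + 1)).drop 2 = v.toList.drop (i + 2) := by
            show (v.toList.drop (i + 1)).drop 1 = _
            rw [List.drop_drop]
          have hd2w : (w.toList[j] :: w.toList.drop (j + 1)).drop 2 = w.toList.drop (j + 2) := by
            show (w.toList.drop (j + 1)).drop 1 = _
            rw [List.drop_drop]
          by_cases hsw : 1 < (v.toList[i] :: v.toList.drop (i + 1)).length ∧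
              1 < (w.toList[j] :: w.toList.drop (j + 1)).length ∧
              (v.toList[i] :: v.toList.drop (i + 1)).getD 0 'x' =
                (w.toList[j] :: w.toList.drop (j + 1)).getD 1 'x' ∧
              (v.toList[i] :: v.toList.drop (i + 1)).getD 1 'x' =
                (w.toList[j] :: w.toList.drop (j + 1)).getD 0 'x'
          · rw [if_pos (hswiff.mpr hsw), if_pos hsw]
            have hi2 : i + 1 < v.toList.length := hlen1.mp hsw.1
            have hj2 : j + 1 < w.toList.length := hlen2.mp hsw.2.1
            rw [hb2 hi2, show ((j : Int) + 2) = ((j + 2 : Nat) : Int) by push_cast; ring,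
              PySem.List.pyGetD_natCast,
              pvRow_getD memo v.toList w.toList (i + 2) (j + 2) (by omega)]
            rw [hd2v, hd2w]
            unfold pvCell
            rw [← hwj, ← hvi]
            simp only [min_def]
            split_ifs <;> omega
          · rw [if_neg (fun hh => hsw (hswiff.mp hh)), if_neg hsw]
            unfold pvCell
            rw [← hwj, ← hvi]
            simp only [min_def]
            split_ifs <;> omega

lemma bInner_step (v w : String) (memo : List (List String × Int)) (below2 below : List Int)
    (i j : Nat) (hi : i ≤ v.toList.length) (hj : j ≤ w.toList.length)
    (hb : i < v.toList.length → below = pvRow memo v.toList w.toList (i + 1) 0)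
    (hb2 : i + 1 < v.toList.length → below2 = pvRow memo v.toList w.toList (i + 2) 0) :
    bInner v.toList w.toList (v.toList.length : Int) (w.toList.length : Int)
      (seedOf v w memo) below2 below (i : Int)
      (pvRow memo v.toList w.toList i (j + 1), pvR memo v.toList w.toList i (j + 1)) (j : Int)
    = (pvRow memo v.toList w.toList i j, pvR memo v.toList w.toList i j) := by
  unfold bInner
  dsimp only
  rw [bCur_eq v w memo below2 below i j hi hj hb hb2]
  rw [pvRow_cons memo v.toList w.toList i j hj]
  unfold pvR
  rw [if_pos hj]

lemma bInner_fold (v w : String) (memo : List (List String × Int)) (below2 below : List Int)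
    (i : Nat) (hi : i ≤ v.toList.length)
    (hb : i < v.toList.length → below = pvRow memo v.toList w.toList (i + 1) 0)
    (hb2 : i + 1 < v.toList.length → below2 = pvRow memo v.toList w.toList (i + 2) 0) :
    ∀ (j : Nat), j ≤ w.toList.length + 1 →
      (PySem.List.pyRange ((j : Int) - 1) (-1) (-1)).foldl
        (bInner v.toList w.toList (v.toList.length : Int) (w.toList.length : Int)
          (seedOf v w memo) below2 below (i : Int))
        (pvRow memo v.toList w.toList i j, pvR memo v.toList w.toList i j)
      = (pvRow memo v.toList w.toList i 0, pvR memo v.toList w.toList i 0) := by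
  intro j
  induction j with
  | zero =>
    intro _
    rw [PySem.List.pyRange_neg_one_eq_nil (by norm_num)]
    rfl
  | succ j ih =>
    intro hj
    have h1 : ((j + 1 : Nat) : Int) - 1 = (j : Int) := by push_cast; ring
    rw [h1, PySem.List.pyRange_neg_one_cons (by omega)]
    rw [List.foldl_cons, bInner_step v w memo below2 below i j hi (by omega) hb hb2]
    exact ih (by omega)

def pvStO (memo : List (List String × Int)) (vl wl : List Char) (i : Nat) : List Int × List Int :=
  if i = vl.length + 1 then ([], [])
  else ((if i = vl.length then [] else pvRow memo vl wl (i + 1) 0), pvRow memo vl wl i 0)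

lemma pvRow_top (memo : List (List String × Int)) (vl wl : List Char) (i : Nat) :
    pvRow memo vl wl i (wl.length + 1) = [] ∧ pvR memo vl wl i (wl.length + 1) = 0 := by
  constructor
  · unfold pvRow
    rw [show wl.length + 1 - (wl.length + 1) = 0 by omega]
    rfl
  · unfold pvR
    rw [if_neg (by omega)]

lemma bOuter_step (v w : String) (memo : List (List String × Int)) (i : Nat)
    (hi : i ≤ v.toList.length) :
    bOuter v.toList w.toList (v.toList.length : Int) (w.toList.length : Int)
      (seedOf v w memo) (pvStO memo v.toList w.toList (i + 1)) (i : Int)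
    = pvStO memo v.toList w.toList i := by
  have hb : i < v.toList.length →
      (pvStO memo v.toList w.toList (i + 1)).2 = pvRow memo v.toList w.toList (i + 1) 0 := by
    intro h; unfold pvStO; rw [if_neg (by omega)]
  have hb2 : i + 1 < v.toList.length →
      (pvStO memo v.toList w.toList (i + 1)).1 = pvRow memo v.toList w.toList (i + 2) 0 := by
    intro h; unfold pvStO; rw [if_neg (by omega)]
    show (if i + 1 = v.toList.length then [] else _) = _
    rw [if_neg (by omega)]
  have hfold := bInner_fold v w memo (pvStO memo v.toList w.toList (i + 1)).1
    (pvStO memo v.toList w.toList (i + 1)).2 i hi hb hb2 (w.toList.length + 1) le_rfl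
  rw [show ((w.toList.length + 1 : Nat) : Int) - 1 = (w.toList.length : Int) by push_cast; ring,
    (pvRow_top memo v.toList w.toList i).1, (pvRow_top memo v.toList w.toList i).2] at hfold
  unfold bOuter
  dsimp only
  by_cases hin : i = v.toList.length
  · have e1 : pvStO memo v.toList w.toList (i + 1) = ([], []) := by
      unfold pvStO; rw [if_pos (by omega)]
    have e2 : pvStO memo v.toList w.toList i =
        ((if i = v.toList.length then [] else pvRow memo v.toList w.toList (i + 1) 0),
          pvRow memo v.toList w.toList i 0) := by
      unfold pvStO; rw [if_neg (by omega)]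
    rw [e1] at hfold
    rw [e1, hfold, e2, if_pos hin]
  · have e1 : pvStO memo v.toList w.toList (i + 1) =
        ((if i + 1 = v.toList.length then [] else pvRow memo v.toList w.toList (i + 2) 0),
          pvRow memo v.toList w.toList (i + 1) 0) := by
      unfold pvStO; rw [if_neg (by omega)]
    have e2 : pvStO memo v.toList w.toList i =
        ((if i = v.toList.length then [] else pvRow memo v.toList w.toList (i + 1) 0),
          pvRow memo v.toList w.toList i 0) := by
      unfold pvStO; rw [if_neg (by omega)]
    rw [e1] at hfold
    rw [e1, hfold, e2, if_neg hin]

lemma bOuter_fold (v w : String) (memo : List (List String × Int)) :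
    ∀ (i : Nat), i ≤ v.toList.length + 1 →
      (PySem.List.pyRange ((i : Int) - 1) (-1) (-1)).foldl
        (bOuter v.toList w.toList (v.toList.length : Int) (w.toList.length : Int) (seedOf v w memo))
        (pvStO memo v.toList w.toList i)
      = pvStO memo v.toList w.toList 0 := by
  intro i
  induction i with
  | zero =>
    intro _
    rw [PySem.List.pyRange_neg_one_eq_nil (by norm_num)]
    rfl
  | succ i ih =>
    intro hi
    have h1 : ((i + 1 : Nat) : Int) - 1 = (i : Int) := by push_cast; ring
    rw [h1, PySem.List.pyRange_neg_one_cons (by omega)]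
    rw [List.foldl_cons, bOuter_step v w memo i (by omega)]
    exact ih (by omega)

lemma B_eq_F (v w : String) (memo : List (List String × Int)) :
    memoized_distance_alt v w memo = Fspec (PySem.Dict.mk memo) v.toList w.toList := by
  unfold memoized_distance_alt
  dsimp only
  rw [show (([], []) : List Int × List Int) = pvStO memo v.toList w.toList (v.toList.length + 1) by
    unfold pvStO; rw [if_pos rfl]]
  have hfold := bOuter_fold v w memo (v.toList.length + 1) le_rfl
  rw [show ((v.toList.length + 1 : Nat) : Int) - 1 = (v.toList.length : Int) by push_cast; ring]
    at hfold
  rw [hfold]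
  rw [show (pvStO memo v.toList w.toList 0).2 = pvRow memo v.toList w.toList 0 0 by
    unfold pvStO; rw [if_neg (by omega)]]
  rw [PySem.List.pyGetD_zero, pvRow_getD memo v.toList w.toList 0 0 (by omega)]
  unfold pvCell
  rw [List.drop_zero, List.drop_zero]

-- ===== VERDICT (by name: the statement is the Claim_ definition above) =====
theorem memoized_distance_spec : Claim_equal_memoized_distance := by
  intro v w memo _
  unfold Spec_memoized_distance
  rw [A_eq_F, B_eq_F]
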